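-- pv_equiv track=rewrite | github.com/u-nivusJO/programmers | Lv.2/마법의 엘리베이터.py | solution
-- ===== SOURCE A (Python) =====
-- def solution(storey):
--     answer=0
--     while storey>0:
--         temp=storey%10
--         if temp>5 or (temp==5 and (storey%100)-temp>=50):
--             answer+=10-temp
--             storey=(storey+10-temp)//10
--         else:
--             answer+=temp
--             storey=(storey-temp)//10
--     return answer
-- ===== SOURCE B (Python) =====
-- def solution(storey):
--     if storey <= 0:
--         return 0
--     if storey < 10:
--         return min(storey, 11 - storey)
--     d = storey % 10
--     return min(d + solution(storey // 10), (10 - d) + solution(storey // 10 + 1))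
-- ===== Notes on version B (the rewrite author's own statement) =====
-- stated objective: simpler
-- what changed: Replaced A's greedy iterative loop with an accumulator and an explicit round-half tie-break on the next two digits by a short recursion over decimal digits that returns the minimum of the press-down and press-up-with-carry choices.
import Mathlib
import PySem

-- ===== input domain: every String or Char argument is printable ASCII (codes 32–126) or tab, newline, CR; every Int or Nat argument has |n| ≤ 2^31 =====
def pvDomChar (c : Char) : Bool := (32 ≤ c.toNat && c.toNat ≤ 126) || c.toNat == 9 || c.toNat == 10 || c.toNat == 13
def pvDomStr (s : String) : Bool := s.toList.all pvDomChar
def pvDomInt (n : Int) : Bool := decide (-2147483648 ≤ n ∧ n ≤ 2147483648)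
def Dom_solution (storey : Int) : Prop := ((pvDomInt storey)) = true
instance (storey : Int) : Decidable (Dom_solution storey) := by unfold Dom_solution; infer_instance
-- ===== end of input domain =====

-- B replaces A's greedy loop (with its explicit half-way tie-break on the next digit)
-- by a short digit recursion that takes the minimum of the press-down and
-- press-up-with-carry choices; objective: simpler.

-- ===== PORT A =====
-- literal transliteration of A's while-loop, with the accumulator `answer`;
-- the Nat fuel (storey.toNat suffices, the loop variable strictly decreases) only
-- makes the recursion structural, it never changes the computed value
def solutionLoop : Nat → Int → Int → Int
  | 0, _, answer => answer
  | fuel + 1, storey, answer =>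
    if 0 < storey then
      let temp := PySem.Int.mod storey 10
      if 5 < temp ∨ (temp = 5 ∧ 50 ≤ PySem.Int.mod storey 100 - temp) then
        solutionLoop fuel (PySem.Int.floordiv (storey + 10 - temp) 10) (answer + (10 - temp))
      else
        solutionLoop fuel (PySem.Int.floordiv (storey - temp) 10) (answer + temp)
    else answer

def solution (storey : Int) : Int := solutionLoop storey.toNat storey 0

-- ===== PORT B =====
-- same fuel device: storey.toNat bounds the recursion depth
def solutionAltGo : Nat → Int → Int
  | 0, _ => 0
  | fuel + 1, storey =>
    if storey ≤ 0 then 0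
    else if storey < 10 then min storey (11 - storey)
    else
      let d := PySem.Int.mod storey 10
      min (d + solutionAltGo fuel (PySem.Int.floordiv storey 10))
          ((10 - d) + solutionAltGo fuel (PySem.Int.floordiv storey 10 + 1))

def solution_alt (storey : Int) : Int := solutionAltGo storey.toNat storey

-- ===== PRECONDITION & SPEC =====
def Spec_solution (storey : Int) (out : Int) : Prop := out = solution_alt storey
instance (storey : Int) (out : Int) : Decidable (Spec_solution storey out) := by unfold Spec_solution; infer_instance

-- ===== CLAIM (what is proved, stated in full; the proofs are below) =====
def Claim_equal_solution : Prop := ∀ (storey : Int), Dom_solution storey → Spec_solution storey (solution storey)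

-- ===== LEMMAS AND PROOFS =====

theorem Bgo_nonpos (fuel : Nat) (n : Int) (h : n ≤ 0) : solutionAltGo fuel n = 0 := by
  cases fuel with
  | zero => rfl
  | succ fuel => rw [solutionAltGo, if_pos h]

-- with enough fuel (n.toNat units suffice) the result does not depend on the fuel
theorem Bgo_stable : ∀ k : Nat, ∀ n : Int, n.toNat = k → ∀ f1 f2 : Nat,
    n.toNat ≤ f1 → n.toNat ≤ f2 → solutionAltGo f1 n = solutionAltGo f2 n := by
  intro k
  induction k using Nat.strong_induction_on with
  | _ k IH =>
    intro n hk f1 f2 h1 h2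
    by_cases hn : n ≤ 0
    · rw [Bgo_nonpos f1 n hn, Bgo_nonpos f2 n hn]
    · obtain ⟨g1, rfl⟩ : ∃ g, f1 = g + 1 := ⟨f1 - 1, by omega⟩
      obtain ⟨g2, rfl⟩ : ∃ g, f2 = g + 1 := ⟨f2 - 1, by omega⟩
      rw [solutionAltGo, solutionAltGo]
      by_cases h10 : n < 10
      · rw [if_neg hn, if_neg hn, if_pos h10, if_pos h10]
      · rw [if_neg hn, if_neg hn, if_neg h10, if_neg h10]
        have hf : PySem.Int.floordiv n 10 = n / 10 :=
          PySem.Int.floordiv_eq_ediv_of_pos (by norm_num)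
        rw [hf]
        rw [IH (n / 10).toNat (by omega) (n / 10) rfl g1 g2 (by omega) (by omega)]
        rw [IH (n / 10 + 1).toNat (by omega) (n / 10 + 1) rfl g1 g2 (by omega) (by omega)]

-- evaluation equations for solution_alt, with Python's // and % turned into Lean's / and %
theorem B_nonpos (n : Int) (h : n ≤ 0) : solution_alt n = 0 := Bgo_nonpos _ n h

theorem B_small (n : Int) (h0 : 0 < n) (h9 : n < 10) :
    solution_alt n = min n (11 - n) := by
  unfold solution_alt
  obtain ⟨m, hm⟩ : ∃ m, n.toNat = m + 1 := ⟨n.toNat - 1, by omega⟩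
  rw [hm, solutionAltGo, if_neg (by omega), if_pos h9]

theorem B_rec (n : Int) (h : 10 ≤ n) :
    solution_alt n = min (n % 10 + solution_alt (n / 10))
                         ((10 - n % 10) + solution_alt (n / 10 + 1)) := by
  unfold solution_alt
  obtain ⟨m, hm⟩ : ∃ m, n.toNat = m + 1 := ⟨n.toNat - 1, by omega⟩
  rw [hm, solutionAltGo, if_neg (by omega), if_neg (by omega)]
  have hf : PySem.Int.floordiv n 10 = n / 10 :=
    PySem.Int.floordiv_eq_ediv_of_pos (by norm_num)
  have hmod : PySem.Int.mod n 10 = n % 10 :=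
    PySem.Int.mod_eq_emod_of_pos (by norm_num)
  rw [hf, hmod]
  rw [Bgo_stable (n / 10).toNat (n / 10) rfl m (n / 10).toNat (by omega) (by omega)]
  rw [Bgo_stable (n / 10 + 1).toNat (n / 10 + 1) rfl m (n / 10 + 1).toNat (by omega) (by omega)]

-- |solution_alt (n+1) - solution_alt n| ≤ 1 for n ≥ 0 (one extra button press changes the floor by one)
theorem B_lip : ∀ k : Nat, ∀ n : Int, 0 ≤ n → n.toNat = k →
    solution_alt n ≤ solution_alt (n + 1) + 1 ∧ solution_alt (n + 1) ≤ solution_alt n + 1 := by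
  intro k
  induction k using Nat.strong_induction_on with
  | _ k IH =>
    intro n hn hk
    by_cases h10 : 10 ≤ n
    · have h1 := B_rec n h10
      have h2 := B_rec (n + 1) (by omega)
      by_cases he : n % 10 = 9
      · have hq : (n + 1) / 10 = n / 10 + 1 := by omega
        have hm : (n + 1) % 10 = 0 := by omega
        rw [hq, hm] at h2
        have ih1 := IH (n / 10).toNat (by omega) (n / 10) (by omega) rfl
        have ih2 := IH (n / 10 + 1).toNat (by omega) (n / 10 + 1) (by omega) rfl
        omega
      · have hq : (n + 1) / 10 = n / 10 := by omega
        have hm : (n + 1) % 10 = n % 10 + 1 := by omega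
        rw [hq, hm] at h2
        omega
    · -- 0 ≤ n ≤ 9
      by_cases h9 : n = 9
      · subst h9
        have h1 := B_small 9 (by norm_num) (by norm_num)
        have h2 := B_rec 10 (by norm_num)
        norm_num at h2
        have h3 := B_small 1 (by norm_num) (by norm_num)
        have h4 := B_small 2 (by norm_num) (by norm_num)
        norm_num [h3, h4] at h2
        norm_num [h1, h2]
      · by_cases h0 : n = 0
        · subst h0
          have h1 := B_nonpos 0 le_rfl
          have h2 := B_small 1 (by norm_num) (by norm_num)
          norm_num [h1, h2]
        · have h1 := B_small n (by omega) (by omega)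
          have h2 := B_small (n + 1) (by omega) (by omega)
          omega

-- the half-way tie: pressing up is (weakly) better exactly when the next digit is ≥ 5
theorem B_tie (q : Int) (hq : 0 ≤ q) :
    (5 ≤ q % 10 → solution_alt (q + 1) ≤ solution_alt q) ∧
    (q % 10 < 5 → solution_alt q ≤ solution_alt (q + 1)) := by
  by_cases h10 : 10 ≤ q
  · have h1 := B_rec q h10
    have h2 := B_rec (q + 1) (by omega)
    have lip := B_lip (q / 10).toNat (q / 10) (by omega) rfl
    by_cases he : q % 10 = 9
    · have hq1 : (q + 1) / 10 = q / 10 + 1 := by omega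
      have hm : (q + 1) % 10 = 0 := by omega
      rw [hq1, hm] at h2
      omega
    · have hq1 : (q + 1) / 10 = q / 10 := by omega
      have hm : (q + 1) % 10 = q % 10 + 1 := by omega
      rw [hq1, hm] at h2
      omega
  · -- 0 ≤ q ≤ 9
    by_cases h9 : q = 9
    · subst h9
      have h1 := B_small 9 (by norm_num) (by norm_num)
      have h2 := B_rec 10 (by norm_num)
      norm_num at h2
      have h3 := B_small 1 (by norm_num) (by norm_num)
      have h4 := B_small 2 (by norm_num) (by norm_num)
      norm_num [h3, h4] at h2
      norm_num [h1, h2]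
    · by_cases h0 : q = 0
      · subst h0
        have h1 := B_nonpos 0 le_rfl
        have h2 := B_small 1 (by norm_num) (by norm_num)
        norm_num [h1, h2]
      · have h1 := B_small q (by omega) (by omega)
        have h2 := B_small (q + 1) (by omega) (by omega)
        omega

-- A's loop computes answer + the optimum: the greedy choice always attains B's minimum
theorem loop_eq : ∀ (fuel : Nat) (s a : Int), s.toNat ≤ fuel →
    solutionLoop fuel s a = a + solution_alt s := by
  intro fuel
  induction fuel with
  | zero =>
    intro s a h
    rw [solutionLoop, B_nonpos s (by omega)]
    omega
  | succ fuel IH =>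
    intro s a h
    rw [solutionLoop]
    by_cases hs : 0 < s
    · rw [if_pos hs]
      simp only [PySem.Int.floordiv_eq_ediv_of_pos (show (0:Int) < 10 by norm_num),
        PySem.Int.mod_eq_emod_of_pos (show (0:Int) < 10 by norm_num),
        PySem.Int.mod_eq_emod_of_pos (show (0:Int) < 100 by norm_num)]
      have hup : (s + 10 - s % 10) / 10 = s / 10 + 1 := by omega
      have hdn : (s - s % 10) / 10 = s / 10 := by omega
      by_cases hc : 5 < s % 10 ∨ (s % 10 = 5 ∧ 50 ≤ s % 100 - s % 10)
      · rw [if_pos hc, hup]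
        rw [IH (s / 10 + 1) (a + (10 - s % 10)) (by omega)]
        by_cases h10 : 10 ≤ s
        · have h1 := B_rec s h10
          have lip := B_lip (s / 10).toNat (s / 10) (by omega) rfl
          have tie := B_tie (s / 10) (by omega)
          have hdig : s / 10 % 10 = s % 100 / 10 := by omega
          omega
        · -- 6 ≤ s ≤ 9 (s = 5 cannot take this branch: s % 100 - 5 = 0 < 50)
          have hs6 : 6 ≤ s := by omega
          have h1 := B_small s (by omega) (by omega)
          have h2 : s / 10 + 1 = 1 := by omega
          rw [h2, B_small 1 (by norm_num) (by norm_num)]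
          omega
      · rw [if_neg hc, hdn]
        rw [IH (s / 10) (a + s % 10) (by omega)]
        by_cases h10 : 10 ≤ s
        · have h1 := B_rec s h10
          have lip := B_lip (s / 10).toNat (s / 10) (by omega) rfl
          have tie := B_tie (s / 10) (by omega)
          have hdig : s / 10 % 10 = s % 100 / 10 := by omega
          omega
        · have h1 := B_small s (by omega) (by omega)
          have h2 : s / 10 = 0 := by omega
          rw [h2, B_nonpos 0 le_rfl]
          omega
    · rw [if_neg hs, B_nonpos s (by omega)]
      omega

-- ===== VERDICT (by name: the statement is the Claim_ definition above) =====
theorem solution_spec : Claim_equal_solution := by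
  intro storey _
  unfold Spec_solution solution
  rw [loop_eq storey.toNat storey 0 le_rfl]
  omega
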